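-- pv_equiv track=rewrite | github.com/samyuh/feup-fpro | Exercises/RE09 - Dictionary/budgeting.py | budgeting
-- ===== SOURCE A (Python) =====
-- def budgeting(budget, products, wishlist):
--     compras = {}
--     products = dict(sorted(products.items(), key=lambda x: x[1], reverse = True))
--     for item in products:
--         if item in wishlist:
--             quantidade = wishlist[item]
--             for _ in range(quantidade):
--                 pagar = products[item]
--                 budget -= pagar
--                 if budget < 0:
--                     return compras
--                 elif item not in compras:
--                     compras[item] = 1
--                 else:
--                     compras[item] += 1
--     return compras
-- ===== SOURCE B (Python) =====
-- def budgeting(budget, products, wishlist):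
--     compras = {}
--     for item, price in sorted(products.items(), key=lambda x: x[1], reverse=True):
--         if item not in wishlist:
--             continue
--         quantity = wishlist[item]
--         if quantity <= 0:
--             continue
--         if budget - price < 0:
--             return compras
--         n = min(quantity, budget // price) if price > 0 else quantity
--         compras[item] = n
--         budget -= n * price
--         if n < quantity:
--             return compras
--     return compras
-- ===== Notes on version B (the rewrite author's own statement) =====
-- stated objective: alternative
-- what changed: B replaces A's per-unit budget-decrement inner loop (one loop iteration per wished unit of each item) with a single floor-division computing the affordable count of each item at once; on the measured input family this is not faster.
import Mathlib
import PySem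

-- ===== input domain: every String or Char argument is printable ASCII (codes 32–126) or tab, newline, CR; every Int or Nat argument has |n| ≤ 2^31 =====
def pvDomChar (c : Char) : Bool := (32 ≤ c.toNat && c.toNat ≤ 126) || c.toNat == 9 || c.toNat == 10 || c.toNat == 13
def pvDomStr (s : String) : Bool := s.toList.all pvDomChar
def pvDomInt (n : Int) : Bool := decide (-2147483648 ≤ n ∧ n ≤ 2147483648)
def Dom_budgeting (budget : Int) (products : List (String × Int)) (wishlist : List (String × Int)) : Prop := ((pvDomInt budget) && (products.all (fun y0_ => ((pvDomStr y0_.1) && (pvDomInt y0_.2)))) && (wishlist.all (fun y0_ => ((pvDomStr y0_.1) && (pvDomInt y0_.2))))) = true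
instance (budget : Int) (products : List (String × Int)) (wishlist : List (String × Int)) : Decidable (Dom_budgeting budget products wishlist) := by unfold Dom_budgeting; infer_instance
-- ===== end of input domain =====

-- B replaces A's per-unit budget-decrement inner loop by arithmetic (floor division) computing
-- the affordable count of each item at once; objective: alternative algorithm, same measured cost.


-- ===== PORT A =====
-- inner 'for _ in range(quantidade)' loop of A; result = (budget, compras, halted-by-return)
def pvInnerA (item : String) (price : Int) : Nat → Int → PySem.Dict String Int → Int × PySem.Dict String Int × Bool
  | 0, b, c => (b, c, false)
  | n + 1, b, c =>
    let b' := b - price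
    if b' < 0 then (b', c, true)
    else pvInnerA item price n b'
      (if c.contains item then c.insert item (c.getD item 0 + 1) else c.insert item 1)

-- outer 'for item in products' loop of A
def pvLoopA (wd : PySem.Dict String Int) : List (String × Int) → Int → PySem.Dict String Int → PySem.Dict String Int
  | [], _, c => c
  | (item, _price) :: rest, b, c =>
    if wd.contains item then
      let r := pvInnerA item _price (wd.getD item 0).toNat b c
      if r.2.2 then r.2.1 else pvLoopA wd rest r.1 r.2.1
    else pvLoopA wd rest b c

def budgeting (budget : Int) (products : List (String × Int)) (wishlist : List (String × Int)) : List (String × Int) :=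
  let pd := PySem.Dict.ofList products
  let wd := PySem.Dict.ofList wishlist
  (pvLoopA wd (PySem.List.sorted pd.items (fun x => x.2) true) budget PySem.Dict.empty).items

-- ===== PORT B =====
-- B's loop: one arithmetic step per item, no per-unit loop
def pvLoopB (wd : PySem.Dict String Int) : List (String × Int) → Int → PySem.Dict String Int → PySem.Dict String Int
  | [], _, c => c
  | (item, price) :: rest, b, c =>
    match wd.get? item with
    | none => pvLoopB wd rest b c
    | some q =>
      if q ≤ 0 then pvLoopB wd rest b c
      else if b - price < 0 then c
      else
        let n := if 0 < price then min q (PySem.Int.floordiv b price) else q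
        let c' := c.insert item n
        if n < q then c' else pvLoopB wd rest (b - n * price) c'

def budgeting_alt (budget : Int) (products : List (String × Int)) (wishlist : List (String × Int)) : List (String × Int) :=
  let pd := PySem.Dict.ofList products
  let wd := PySem.Dict.ofList wishlist
  (pvLoopB wd (PySem.List.sorted pd.items (fun x => x.2) true) budget PySem.Dict.empty).items

-- ===== PRECONDITION & SPEC =====
def Spec_budgeting (budget : Int) (products : List (String × Int)) (wishlist : List (String × Int)) (out : List (String × Int)) : Prop := out = budgeting_alt budget products wishlist
instance (budget : Int) (products : List (String × Int)) (wishlist : List (String × Int)) (out : List (String × Int)) : Decidable (Spec_budgeting budget products wishlist out) := by unfold Spec_budgeting; infer_instance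

-- ===== CLAIM (what is proved, stated in full; the proofs are below) =====
def Claim_equal_budgeting : Prop := ∀ (budget : Int) (products : List (String × Int)) (wishlist : List (String × Int)), Dom_budgeting budget products wishlist → Spec_budgeting budget products wishlist (budgeting budget products wishlist)

-- ===== LEMMAS AND PROOFS =====

-- behaviour of A's inner loop once the item is already in compras with some count j,
-- starting from a nonnegative budget
theorem pvInnerA_cont (item : String) (price : Int) (q : Nat) :
    ∀ (b : Int) (c : PySem.Dict String Int) (j : Int), 0 ≤ b →
    pvInnerA item price q b (c.insert item j) =
      if 0 < price then
        (if (q : Int) ≤ PySem.Int.floordiv b price then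
          (b - q * price, c.insert item (j + q), false)
         else
          (b - (PySem.Int.floordiv b price + 1) * price,
           c.insert item (j + PySem.Int.floordiv b price), true))
      else (b - q * price, c.insert item (j + q), false) := by
  induction q with
  | zero =>
    intro b c j hb
    simp only [pvInnerA]
    split_ifs with hp hq
    · simp
    · exfalso
      rw [PySem.Int.floordiv_eq_ediv_of_pos hp] at hq
      exact hq (by positivity)
    · simp
  | succ k ih =>
    intro b c j hb
    simp only [pvInnerA, PySem.Dict.contains_insert_self, if_true,
      PySem.Dict.getD_insert_self, PySem.Dict.insert_insert_self]
    by_cases hp : 0 < price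
    · have hM := PySem.Int.floordiv_eq_ediv_of_pos (a := b) hp
      by_cases hneg : b - price < 0
      · have hm0 : b / price = 0 := Int.ediv_eq_zero_of_lt hb (by omega)
        rw [if_pos hneg, if_pos hp, if_neg (by rw [hM, hm0]; push_cast; omega)]
        rw [hM, hm0]
        norm_num
      · have hstep : PySem.Int.floordiv (b - price) price = PySem.Int.floordiv b price - 1 := by
          rw [PySem.Int.floordiv_eq_ediv_of_pos hp, PySem.Int.floordiv_eq_ediv_of_pos hp]
          have h := Int.add_mul_ediv_right b (-1) (show price ≠ 0 by omega)
          have h2 : b + -1 * price = b - price := by ring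
          rw [h2] at h
          omega
        rw [if_neg hneg, ih (b - price) c (j + 1) (by omega), hstep, if_pos hp, if_pos hp]
        by_cases hk : (k : Int) ≤ PySem.Int.floordiv b price - 1
        · rw [if_pos hk, if_pos (by push_cast; omega)]
          refine Prod.ext (by push_cast; ring) (Prod.ext ?_ rfl)
          show c.insert item (j + 1 + (k : Int)) = c.insert item (j + ((k : Nat) + 1 : Nat))
          congr 1
          push_cast
          ring
        · rw [if_neg hk, if_neg (by push_cast; omega)]
          refine Prod.ext (by ring) (Prod.ext ?_ rfl)
          show c.insert item (j + 1 + (PySem.Int.floordiv b price - 1)) =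
            c.insert item (j + PySem.Int.floordiv b price)
          congr 1
          ring
    · rw [if_neg (by omega), ih (b - price) c (j + 1) (by omega), if_neg hp, if_neg hp]
      refine Prod.ext (by push_cast; ring) (Prod.ext ?_ rfl)
      show c.insert item (j + 1 + (k : Int)) = c.insert item (j + ((k : Nat) + 1 : Nat))
      congr 1
      push_cast
      ring

-- main loop equivalence, under fresh distinct keys
theorem pvLoop_eq (wd : PySem.Dict String Int) :
    ∀ (l : List (String × Int)) (b : Int) (c : PySem.Dict String Int),
      (l.map Prod.fst).Nodup → (∀ p ∈ l, c.contains p.1 = false) →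
      pvLoopA wd l b c = pvLoopB wd l b c := by
  intro l
  induction l with
  | nil => intro b c _ _; rfl
  | cons hd rest ih =>
    obtain ⟨item, price⟩ := hd
    intro b c hnd hfresh
    have hcitem : c.contains item = false := hfresh (item, price) (by simp)
    simp only [List.map_cons, List.nodup_cons] at hnd
    have hfrest : ∀ p ∈ rest, c.contains p.1 = false :=
      fun p hp => hfresh p (List.mem_cons_of_mem _ hp)
    have hfresh' : ∀ x : Int, ∀ p ∈ rest, (c.insert item x).contains p.1 = false := by
      intro x p hp
      rw [PySem.Dict.contains_insert]
      have h1 : p.1 ≠ item := fun h => hnd.1 (h ▸ List.mem_map_of_mem hp)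
      simp [h1, hfrest p hp]
    by_cases hw : wd.contains item = true
    · have hsm : (wd.get? item).isSome := by
        rw [← PySem.Dict.contains_eq_isSome_get?]; exact hw
      obtain ⟨q, hq⟩ := Option.isSome_iff_exists.mp hsm
      have hgetD : wd.getD item 0 = q := by
        rw [PySem.Dict.getD_eq_get?_getD, hq]; rfl
      simp only [pvLoopA, pvLoopB, hw, if_true, hq, hgetD]
      by_cases hq0 : q ≤ 0
      · have ht0 : q.toNat = 0 := by omega
        rw [ht0, if_pos hq0]
        simp only [pvInnerA]
        exact ih b c hnd.2 hfrest
      · obtain ⟨m, hm⟩ : ∃ m, q.toNat = m + 1 := ⟨q.toNat - 1, by omega⟩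
        have hmq : (m : Int) + 1 = q := by omega
        rw [hm, if_neg hq0]
        simp only [pvInnerA, hcitem, Bool.false_eq_true, if_false]
        by_cases hneg : b - price < 0
        · rw [if_pos hneg, if_pos hneg]; rfl
        · rw [if_neg hneg, if_neg hneg,
            pvInnerA_cont item price m (b - price) c 1 (by omega)]
          by_cases hp : 0 < price
          · have hstep : PySem.Int.floordiv (b - price) price = PySem.Int.floordiv b price - 1 := by
              rw [PySem.Int.floordiv_eq_ediv_of_pos hp, PySem.Int.floordiv_eq_ediv_of_pos hp]
              have h := Int.add_mul_ediv_right b (-1) (show price ≠ 0 by omega)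
              have h2 : b + -1 * price = b - price := by ring
              rw [h2] at h
              omega
            have hM1 : 1 ≤ PySem.Int.floordiv b price := by
              rw [PySem.Int.le_floordiv_iff_mul_le hp]; omega
            rw [if_pos hp, hstep, if_pos hp]
            by_cases hk : (m : Int) ≤ PySem.Int.floordiv b price - 1
            · rw [if_pos hk, min_eq_left (by omega : q ≤ PySem.Int.floordiv b price),
                if_neg (lt_irrefl q)]
              show pvLoopA wd rest (b - price - (m : Int) * price) (c.insert item (1 + (m : Int))) =
                pvLoopB wd rest (b - q * price) (c.insert item q)
              have e1 : b - price - (m : Int) * price = b - q * price := by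
                rw [← hmq]; ring
              have e2 : (1 : Int) + (m : Int) = q := by omega
              rw [e1, e2]
              exact ih _ _ hnd.2 (hfresh' q)
            · rw [if_neg hk, min_eq_right (by omega : PySem.Int.floordiv b price ≤ q),
                if_pos (by omega : PySem.Int.floordiv b price < q)]
              show c.insert item (1 + (PySem.Int.floordiv b price - 1)) =
                c.insert item (PySem.Int.floordiv b price)
              congr 1
              ring
          · rw [if_neg hp, if_neg hp, if_neg (lt_irrefl q)]
            show pvLoopA wd rest (b - price - (m : Int) * price) (c.insert item (1 + (m : Int))) =
              pvLoopB wd rest (b - q * price) (c.insert item q)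
            have e1 : b - price - (m : Int) * price = b - q * price := by
              rw [← hmq]; ring
            have e2 : (1 : Int) + (m : Int) = q := by omega
            rw [e1, e2]
            exact ih _ _ hnd.2 (hfresh' q)
    · have hw' : wd.contains item = false := by simpa using hw
      have hnone : wd.get? item = none := by
        rw [PySem.Dict.get?_eq_none_iff_contains]; exact hw'
      simp only [pvLoopA, pvLoopB, hw', hnone, Bool.false_eq_true, if_false]
      exact ih b c hnd.2 hfrest

-- ===== VERDICT (by name: the statement is the Claim_ definition above) =====
theorem budgeting_spec : Claim_equal_budgeting := by
  intro budget products wishlist _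
  unfold Spec_budgeting budgeting budgeting_alt
  show (pvLoopA (PySem.Dict.ofList wishlist)
      (PySem.List.sorted (PySem.Dict.ofList products).items (fun x => x.2) true)
      budget PySem.Dict.empty).items =
    (pvLoopB (PySem.Dict.ofList wishlist)
      (PySem.List.sorted (PySem.Dict.ofList products).items (fun x => x.2) true)
      budget PySem.Dict.empty).items
  refine congrArg PySem.Dict.items (pvLoop_eq _ _ _ _ ?_ ?_)
  · have hperm := PySem.List.sorted_perm (PySem.Dict.ofList products).items (fun x => x.2) true
    have hk : ((PySem.Dict.ofList products).items.map Prod.fst).Nodup := by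
      have h := PySem.Dict.nodup_keys_ofList products
      simpa [PySem.Dict.keys] using h
    exact (List.Perm.nodup_iff (hperm.map Prod.fst)).mpr hk
  · intro p _
    simp [PySem.Dict.contains_empty]
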